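-- pv_equiv track=rewrite | github.com/brady-spiva/advent_of_code_2024 | advent_of_code/2024/day_2/main.py | determine_safety_of_nuclear_reactor_report
-- ===== SOURCE A (Python) =====
-- def determine_safety_of_nuclear_reactor_report(report:list) -> bool:
--
--     def calculate_differences(report:list) -> list:
--         return [y - x for x, y in zip(report, report[1:])]
--     # what are the differences between the levels?
--     differences = calculate_differences(report)
--
--     # safe levels have an absolute difference between 1 and 3
--     differences_bool = [1 <= abs(diff) <= 3 for diff in differences]
--
--     if all(differences_bool):
--         # are the differences all increasing or decreasing?
--         if all([diff >= 0 for diff in differences]) or all([diff <= 0 for diff in differences]):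
--             return True
--     else:
--         # level 2 - include the problem dampener. Can we remove a single level from the report to make it safe?
--         # try removing a single level
--         for i, diff in enumerate(differences):
--             if 1 <= abs(diff) <= 3:
--                 new_report = report[:i] + report[i+1:]
--                 if determine_safety_of_nuclear_reactor_report(new_report):
--                     return True
--     return False
-- ===== SOURCE B (Python) =====
-- def determine_safety_of_nuclear_reactor_report(report: list) -> bool:
--     # Iterative worklist search over sub-reports instead of A's recursion.
--     stack = [report]
--     while stack:
--         r = stack.pop()
--         diffs = [y - x for x, y in zip(r, r[1:])]
--         if all(1 <= abs(d) <= 3 for d in diffs):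
--             if all(d >= 0 for d in diffs) or all(d <= 0 for d in diffs):
--                 return True
--         else:
--             for i, d in enumerate(diffs):
--                 if 1 <= abs(d) <= 3:
--                     stack.append(r[:i] + r[i + 1:])
--     return False
-- ===== Notes on version B (the rewrite author's own statement) =====
-- stated objective: alternative
-- what changed: Replaces A's self-recursion over dampened sub-reports with an iterative explicit-stack worklist: pop a report, succeed if its successive differences all have magnitude between 1 and 3 and are monotone, otherwise push the sub-reports obtained by removing each safe-difference index; no recursion remains.
import Mathlib
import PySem

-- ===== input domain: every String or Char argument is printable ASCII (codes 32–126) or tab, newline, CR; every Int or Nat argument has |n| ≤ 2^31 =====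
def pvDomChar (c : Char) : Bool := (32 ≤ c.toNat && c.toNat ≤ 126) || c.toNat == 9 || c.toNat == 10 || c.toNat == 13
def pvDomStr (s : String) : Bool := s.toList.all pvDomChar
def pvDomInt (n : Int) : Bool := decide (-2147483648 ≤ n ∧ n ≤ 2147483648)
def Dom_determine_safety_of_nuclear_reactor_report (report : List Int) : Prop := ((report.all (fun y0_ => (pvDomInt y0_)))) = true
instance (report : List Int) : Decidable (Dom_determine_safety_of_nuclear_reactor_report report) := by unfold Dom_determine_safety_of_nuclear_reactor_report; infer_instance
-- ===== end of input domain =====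

-- B replaces A's recursion with an explicit worklist of sub-reports (alternative decomposition, same cost).

-- ===== PORT A =====

-- helper 'calculate_differences' of A: [y - x for x, y in zip(report, report[1:])]
def pyDiffs (report : List Int) : List Int :=
  (report.zip (PySem.List.slice report (some 1) none)).map (fun p => p.2 - p.1)

-- report[:i] + report[i+1:]
def pyRemove (report : List Int) (i : Int) : List Int :=
  PySem.List.slice report none (some i) ++ PySem.List.slice report (some (i + 1)) none

theorem pyDiffs_length (r : List Int) : (pyDiffs r).length = r.length - 1 := by
  simp [pyDiffs, PySem.List.slice_from_one]

theorem pyRemove_length (r : List Int) (k : Nat) (hk : k < r.length) :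
    (pyRemove r (k : Int)).length = r.length - 1 := by
  have h1 : PySem.List.slice r none (some (k : Int)) = r.take k :=
    PySem.List.slice_to_natCast r k
  have h2 : PySem.List.slice r (some ((k : Int) + 1)) none = r.drop (k + 1) := by
    have := PySem.List.slice_from_natCast r (k + 1)
    simpa [Int.natCast_add] using this
  simp [pyRemove, h1, h2]
  omega

def determine_safety_of_nuclear_reactor_report (report : List Int) : Bool :=
  let differences := pyDiffs report
  let differences_bool := differences.map (fun d => decide (1 ≤ |d| ∧ |d| ≤ 3))
  if differences_bool.all id then
    if (differences.map (fun d => decide (0 ≤ d))).all id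
        || (differences.map (fun d => decide (d ≤ 0))).all id then
      true
    else
      false
  else
    (PySem.List.enumerate differences 0).attach.any
      (fun p =>
        if 1 ≤ |p.1.2| ∧ |p.1.2| ≤ 3 then
          determine_safety_of_nuclear_reactor_report (pyRemove report p.1.1)
        else false)
termination_by report.length
decreasing_by
  obtain ⟨⟨i, d⟩, hmem⟩ := p
  rw [PySem.List.mem_enumerate_iff] at hmem
  obtain ⟨k, hk, hpd⟩ := hmem
  have hk' : k < report.length - 1 := by
    have hdl : differences.length = report.length - 1 := pyDiffs_length report
    omega
  have hi : i = (k : Int) := by simpa using congrArg Prod.fst hpd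
  show (pyRemove report i).length < report.length
  rw [hi, pyRemove_length report k (by omega)]
  omega

-- ===== PORT B =====

def bDiffs (r : List Int) : List Int :=
  (r.zip (PySem.List.slice r (some 1) none)).map (fun p => p.2 - p.1)

-- the reports appended to the stack by the inner for-loop, in append order
def bChildren (r : List Int) : List (List Int) :=
  (PySem.List.enumerate (bDiffs r) 0).foldl
    (fun acc p => if 1 ≤ |p.2| ∧ |p.2| ≤ 3 then acc ++ [pyRemove r p.1] else acc) []

theorem mem_bChildren (r c : List Int) :
    c ∈ bChildren r ↔ ∃ p ∈ PySem.List.enumerate (bDiffs r) 0, (1 ≤ |p.2| ∧ |p.2| ≤ 3) ∧ c = pyRemove r p.1 := by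
  unfold bChildren
  generalize PySem.List.enumerate (bDiffs r) 0 = l
  suffices h : ∀ (init : List (List Int)),
      c ∈ l.foldl (fun acc p => if 1 ≤ |p.2| ∧ |p.2| ≤ 3 then acc ++ [pyRemove r p.1] else acc) init ↔
        c ∈ init ∨ ∃ p ∈ l, (1 ≤ |p.2| ∧ |p.2| ≤ 3) ∧ c = pyRemove r p.1 by
    simpa using h []
  induction l with
  | nil => simp
  | cons q t ih =>
    intro init
    simp only [List.foldl_cons]
    by_cases hq : 1 ≤ |q.2| ∧ |q.2| ≤ 3
    · rw [if_pos hq, ih]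
      simp only [List.exists_mem_cons_iff, List.mem_append, List.mem_singleton]
      tauto
    · rw [if_neg hq, ih]
      simp only [List.exists_mem_cons_iff]
      tauto

theorem length_bChildren_le (r : List Int) :
    (bChildren r).length ≤ (bDiffs r).length := by
  unfold bChildren
  have hlen : ∀ (l : List (Int × Int)) (init : List (List Int)),
      (l.foldl (fun acc p => if 1 ≤ |p.2| ∧ |p.2| ≤ 3 then acc ++ [pyRemove r p.1] else acc) init).length ≤
        init.length + l.length := by
    intro l
    induction l with
    | nil => simp
    | cons q t ih =>
      intro init
      simp only [List.foldl_cons]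
      by_cases hq : 1 ≤ |q.2| ∧ |q.2| ≤ 3
      · rw [if_pos hq]
        have := ih (init ++ [pyRemove r q.1])
        simp at this ⊢
        omega
      · rw [if_neg hq]
        have := ih init
        simp at this ⊢
        omega
  have := hlen (PySem.List.enumerate (bDiffs r) 0) []
  simpa [PySem.List.length_enumerate] using this

theorem mem_bChildren_length (r c : List Int) (h : c ∈ bChildren r) :
    c.length = r.length - 1 := by
  rw [mem_bChildren] at h
  obtain ⟨⟨i, d⟩, hmem, _, hc⟩ := h
  rw [PySem.List.mem_enumerate_iff] at hmem
  obtain ⟨k, hk, hpd⟩ := hmem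
  have hd : (bDiffs r).length = r.length - 1 := pyDiffs_length r
  have hi : i = (k : Int) := by simpa using congrArg Prod.fst hpd
  subst hc
  simp only [hi]
  exact pyRemove_length r k (by omega)

def pvMeasure (stack : List (List Int)) : Nat :=
  (stack.map (fun r => r.length.factorial)).sum

theorem pvMeasure_push (children rest : List (List Int)) :
    pvMeasure (children.foldl (fun s c => c :: s) rest) =
      pvMeasure children + pvMeasure rest := by
  induction children generalizing rest with
  | nil => simp [pvMeasure]
  | cons c t ih =>
    simp only [List.foldl_cons]
    rw [ih]
    simp [pvMeasure]
    omega

theorem pvMeasure_children_lt (r : List Int) (hne : bDiffs r ≠ []) :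
    pvMeasure (bChildren r) < r.length.factorial := by
  have hlen : (bDiffs r).length = r.length - 1 := pyDiffs_length r
  have hr2 : 2 ≤ r.length := by
    have : (bDiffs r).length ≠ 0 := by simpa using hne
    omega
  have hbound : ∀ c ∈ (bChildren r).map (fun r => r.length.factorial),
      c ≤ (r.length - 1).factorial := by
    intro c hc
    rw [List.mem_map] at hc
    obtain ⟨x, hx, rfl⟩ := hc
    rw [mem_bChildren_length r x hx]
  have hsum := List.sum_le_card_nsmul _ _ hbound
  have hcard : ((bChildren r).map (fun r => r.length.factorial)).length ≤ r.length - 1 := by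
    simpa [hlen] using length_bChildren_le r
  have hfac : (r.length - 1) * (r.length - 1).factorial < r.length.factorial := by
    have : r.length.factorial = r.length * (r.length - 1).factorial := by
      conv_lhs => rw [show r.length = (r.length - 1) + 1 by omega]
      simp [Nat.factorial_succ]
      omega
    rw [this]
    have hpos := Nat.factorial_pos (r.length - 1)
    have : r.length - 1 < r.length := by omega
    exact (Nat.mul_lt_mul_right hpos).mpr this
  calc pvMeasure (bChildren r)
      ≤ ((bChildren r).map (fun r => r.length.factorial)).length • (r.length - 1).factorial :=
        hsum
    _ ≤ (r.length - 1) * (r.length - 1).factorial := by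
        simp only [smul_eq_mul]
        exact Nat.mul_le_mul_right _ hcard
    _ < r.length.factorial := hfac

-- the while-loop of B: head of the list = top of the Python stack (list.pop / append)
def bLoop (stack : List (List Int)) : Bool :=
  match stack with
  | [] => false
  | r :: rest =>
    let diffs := bDiffs r
    if (diffs.map (fun d => decide (1 ≤ |d| ∧ |d| ≤ 3))).all id then
      if (diffs.map (fun d => decide (0 ≤ d))).all id
          || (diffs.map (fun d => decide (d ≤ 0))).all id then
        true
      else
        bLoop rest
    else
      bLoop ((bChildren r).foldl (fun s c => c :: s) rest)
termination_by pvMeasure stack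
decreasing_by
  · simp [pvMeasure]
    have := Nat.factorial_pos r.length
    omega
  · rw [pvMeasure_push]
    rename_i hex
    have hne : bDiffs r ≠ [] := by
      intro h0
      have h0' : diffs = [] := h0
      rw [h0'] at hex
      simp at hex
    have hlt := pvMeasure_children_lt r hne
    simp only [pvMeasure, List.map_cons, List.sum_cons] at hlt ⊢
    omega

def determine_safety_of_nuclear_reactor_report_alt (report : List Int) : Bool :=
  bLoop [report]

-- ===== PRECONDITION & SPEC =====
def Spec_determine_safety_of_nuclear_reactor_report (report : List Int) (out : Bool) : Prop := out = determine_safety_of_nuclear_reactor_report_alt report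
instance (report : List Int) (out : Bool) : Decidable (Spec_determine_safety_of_nuclear_reactor_report report out) := by unfold Spec_determine_safety_of_nuclear_reactor_report; infer_instance

-- ===== CLAIM (what is proved, stated in full; the proofs are below) =====
def Claim_equal_determine_safety_of_nuclear_reactor_report : Prop := ∀ (report : List Int), Dom_determine_safety_of_nuclear_reactor_report report → Spec_determine_safety_of_nuclear_reactor_report report (determine_safety_of_nuclear_reactor_report report)

-- ===== LEMMAS AND PROOFS =====

theorem pyA_children (r : List Int)
    (h : ¬ ((bDiffs r).map (fun d => decide (1 ≤ |d| ∧ |d| ≤ 3))).all id = true) :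
    determine_safety_of_nuclear_reactor_report r = (bChildren r).any determine_safety_of_nuclear_reactor_report := by
  rw [determine_safety_of_nuclear_reactor_report]
  have hd : pyDiffs r = bDiffs r := rfl
  simp only [hd] at h ⊢
  rw [if_neg h]
  rcases Bool.eq_false_or_eq_true ((bChildren r).any determine_safety_of_nuclear_reactor_report) with hb | hb
  · rw [hb]
    rw [List.any_eq_true] at hb ⊢
    obtain ⟨c, hc, hAc⟩ := hb
    rw [mem_bChildren] at hc
    obtain ⟨p, hp, hsafe, rfl⟩ := hc
    refine ⟨⟨p, hp⟩, List.mem_attach _ _, ?_⟩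
    rw [if_pos hsafe]
    exact hAc
  · rw [hb]
    rw [List.any_eq_false] at hb ⊢
    intro p _
    split_ifs with hs
    · have hmem : pyRemove r p.1.1 ∈ bChildren r := by
        rw [mem_bChildren]
        exact ⟨p.1, p.2, hs, rfl⟩
      simpa using hb _ hmem
    · simp

theorem bLoop_any : ∀ (stack : List (List Int)),
    bLoop stack = stack.any determine_safety_of_nuclear_reactor_report := by
  intro stack
  fun_induction bLoop stack with
  | case1 => simp
  | case2 r rest diffs hall hmono =>
    have : determine_safety_of_nuclear_reactor_report r = true := by
      rw [determine_safety_of_nuclear_reactor_report]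
      have hd : pyDiffs r = bDiffs r := rfl
      simp only [hd] at hall hmono ⊢
      rw [if_pos hall, if_pos hmono]
    simp [this]
  | case3 r rest diffs hall hmono ih =>
    have : determine_safety_of_nuclear_reactor_report r = false := by
      rw [determine_safety_of_nuclear_reactor_report]
      have hd : pyDiffs r = bDiffs r := rfl
      simp only [hd] at hall hmono ⊢
      rw [if_pos hall, if_neg hmono]
    simp [this, ih]
  | case4 r rest diffs hall ih =>
    rw [ih]
    have hkey := pyA_children r (by simpa using hall)
    have hfold : ∀ (cs rest : List (List Int)),
        (cs.foldl (fun s c => c :: s) rest).any determine_safety_of_nuclear_reactor_report =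
          (cs.any determine_safety_of_nuclear_reactor_report
            || rest.any determine_safety_of_nuclear_reactor_report) := by
      intro cs
      induction cs with
      | nil => simp
      | cons c t iht =>
        intro rest
        simp only [List.foldl_cons]
        rw [iht]
        simp only [List.any_cons]
        simp [Bool.or_assoc, Bool.or_left_comm]
    rw [hfold]
    simp [List.any_cons, hkey]

-- ===== VERDICT (by name: the statement is the Claim_ definition above) =====
theorem determine_safety_of_nuclear_reactor_report_spec : Claim_equal_determine_safety_of_nuclear_reactor_report := by
  intro report _
  unfold Spec_determine_safety_of_nuclear_reactor_report determine_safety_of_nuclear_reactor_report_alt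
  rw [bLoop_any]
  simp
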